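-- pv_equiv track=rewrite | github.com/ArrolDsouza/IC_Verification_System | ic_verification_system.py | correct_ocr_errors
-- ===== SOURCE A (Python) =====
-- def correct_ocr_errors(text: str) -> str:
--     corrections = {
--         'Z': '7',
--         'O': '0',
--         'I': '1',
--         'S': '5',
--         'B': '8',
--     }
--     corrected_versions = [text]
--     if 'SN' in text and 'Z' in text:
--         corrected_versions.append(text.replace('Z', '7'))
--     if 'O' in text and any(char.isdigit() for char in text):
--         corrected_versions.append(text.replace('O', '0'))
--     if any(char.isdigit() for char in text):
--         corrected_versions.sort(key=lambda x: sum(c.isdigit() for c in x), reverse=True)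
--     return corrected_versions[0]
-- ===== SOURCE B (Python) =====
-- def _digit_count(s):
--     return sum(c.isdigit() for c in s)
--
-- def correct_ocr_errors(text: str) -> str:
--     if not any(c.isdigit() for c in text):
--         return text
--     best = text
--     if 'SN' in text and 'Z' in text:
--         cand = text.replace('Z', '7')
--         if _digit_count(cand) > _digit_count(best):
--             best = cand
--     if 'O' in text:
--         cand = text.replace('O', '0')
--         if _digit_count(cand) > _digit_count(best):
--             best = cand
--     return best
-- ===== Notes on version B (the rewrite author's own statement) =====
-- stated objective: simpler
-- what changed: Replaces the build-a-list-then-stable-sort-descending-and-take-head scheme by an early return when the text has no digit plus a running best updated only on a strictly larger digit count (Z-variant considered before O-variant), so no list is built and no sort runs.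
import Mathlib
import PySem

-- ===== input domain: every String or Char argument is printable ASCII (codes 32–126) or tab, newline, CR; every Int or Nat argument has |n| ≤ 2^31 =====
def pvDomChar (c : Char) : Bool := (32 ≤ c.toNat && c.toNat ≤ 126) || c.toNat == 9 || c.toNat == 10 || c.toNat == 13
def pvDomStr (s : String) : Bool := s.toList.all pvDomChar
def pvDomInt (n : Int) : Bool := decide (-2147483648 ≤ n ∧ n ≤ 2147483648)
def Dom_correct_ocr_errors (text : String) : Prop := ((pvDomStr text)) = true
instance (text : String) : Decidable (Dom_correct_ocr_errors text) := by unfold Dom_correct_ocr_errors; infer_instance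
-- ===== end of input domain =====

-- B replaces A's build-candidates/stable-sort-descending/take-head by an early no-digit return and a
-- running best with strict-greater updates (objective: simpler; no list, no sort).

-- ===== PORT A =====
-- (A's local dict 'corrections' is never read; it has no counterpart here.)
def correct_ocr_errors (text : String) : String :=
  let corrected_versions : List String := [text]
  let corrected_versions :=
    if PySem.Str.isIn "SN" text && PySem.Str.isIn "Z" text then
      corrected_versions ++ [PySem.Str.replace text "Z" "7"]
    else corrected_versions
  let corrected_versions :=
    if PySem.Str.isIn "O" text && text.toList.any PySem.Chars.isdigit then
      corrected_versions ++ [PySem.Str.replace text "O" "0"]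
    else corrected_versions
  let corrected_versions :=
    if text.toList.any PySem.Chars.isdigit then
      PySem.List.sorted corrected_versions
        (fun x => x.toList.countP (fun c => PySem.Chars.isdigit c)) true
    else corrected_versions
  corrected_versions.headD ""   -- corrected_versions[0]; the list always starts nonempty

-- ===== PORT B =====
def pvDigitCount (s : String) : Nat := s.toList.countP (fun c => PySem.Chars.isdigit c)

def correct_ocr_errors_alt (text : String) : String :=
  if !(text.toList.any PySem.Chars.isdigit) then text
  else
    let best := text
    let best :=
      if PySem.Str.isIn "SN" text && PySem.Str.isIn "Z" text then
        let cand := PySem.Str.replace text "Z" "7"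
        if pvDigitCount best < pvDigitCount cand then cand else best
      else best
    let best :=
      if PySem.Str.isIn "O" text then
        let cand := PySem.Str.replace text "O" "0"
        if pvDigitCount best < pvDigitCount cand then cand else best
      else best
    best

-- ===== PRECONDITION & SPEC =====
def Spec_correct_ocr_errors (text : String) (out : String) : Prop := out = correct_ocr_errors_alt text
instance (text : String) (out : String) : Decidable (Spec_correct_ocr_errors text out) := by unfold Spec_correct_ocr_errors; infer_instance

-- ===== CLAIM (what is proved, stated in full; the proofs are below) =====
def Claim_equal_correct_ocr_errors : Prop := ∀ (text : String), Dom_correct_ocr_errors text → Spec_correct_ocr_errors text (correct_ocr_errors text)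

-- ===== LEMMAS AND PROOFS =====

-- ===== VERDICT (by name: the statement is the Claim_ definition above) =====
theorem correct_ocr_errors_spec : Claim_equal_correct_ocr_errors := by
  intro text _
  unfold Spec_correct_ocr_errors correct_ocr_errors correct_ocr_errors_alt pvDigitCount
  by_cases h3 : text.toList.any PySem.Chars.isdigit
  · simp only [h3, Bool.and_true, Bool.not_true, Bool.false_eq_true, if_false]
    by_cases h1 : (PySem.Str.isIn "SN" text && PySem.Str.isIn "Z" text) = true <;>
      by_cases h2 : PySem.Str.isIn "O" text = true <;>
        simp only [h1, h2, if_true,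
          PySem.List.sorted, PySem.List.insertBy, List.foldl, List.nil_append,
          List.cons_append] <;>
        split_ifs <;> simp_all [PySem.List.insertBy] <;> split_ifs <;> simp_all <;> omega
  · simp only [Bool.not_eq_true] at h3
    simp [h3]
    split_ifs <;> rfl
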